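-- pv_equiv track=rewrite | github.com/E-delweiss/Cul_de_Chouette | CDC_code/CDC_regles.py | le_bleu_rouge
-- ===== SOURCE A (Python) =====
-- from itertools import permutations
--
-- def le_bleu_rouge(dico_dice):
--     """
--     Déterminer si la règle du "Bleu Rouge" est applicable.
--
--     input : dictionnaire contenant le nom des dés et leur valeur
--     output : True /False
--
--
--     Parameters
--     ----------
--     dico_dice : dict
--         Dictionnaire contenant le nom des dés et leur valeur.
--
--     Returns
--     -------
--     state : bool
--         Indique si la combinaison a lieu ou non.
--
--     """
--     chouette_1 = dico_dice['chouette_1']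
--     chouette_2 = dico_dice['chouette_2']
--     cul        = dico_dice['cul']
--
--     tuple_dice = (chouette_1,chouette_2,cul)
--     liste_comb = []
--     BLEU_ROUGE = [3,4,3]
--     for i in permutations(BLEU_ROUGE,3):
--         liste_comb.append(i)
--
--     if tuple_dice in liste_comb:
--         return True
--     else:
--         return False
-- ===== SOURCE B (Python) =====
-- def le_bleu_rouge(dico_dice):
--     chouette_1 = dico_dice['chouette_1']
--     chouette_2 = dico_dice['chouette_2']
--     cul        = dico_dice['cul']
--     return sorted((chouette_1, chouette_2, cul)) == [3, 3, 4]
-- ===== Notes on version B (the rewrite author's own statement) =====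
-- stated objective: simpler
-- what changed: B sorts the three dice into canonical order and compares once with [3,3,4], instead of enumerating all 6 permutations of [3,4,3] into a list and testing tuple membership.
import Mathlib
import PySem

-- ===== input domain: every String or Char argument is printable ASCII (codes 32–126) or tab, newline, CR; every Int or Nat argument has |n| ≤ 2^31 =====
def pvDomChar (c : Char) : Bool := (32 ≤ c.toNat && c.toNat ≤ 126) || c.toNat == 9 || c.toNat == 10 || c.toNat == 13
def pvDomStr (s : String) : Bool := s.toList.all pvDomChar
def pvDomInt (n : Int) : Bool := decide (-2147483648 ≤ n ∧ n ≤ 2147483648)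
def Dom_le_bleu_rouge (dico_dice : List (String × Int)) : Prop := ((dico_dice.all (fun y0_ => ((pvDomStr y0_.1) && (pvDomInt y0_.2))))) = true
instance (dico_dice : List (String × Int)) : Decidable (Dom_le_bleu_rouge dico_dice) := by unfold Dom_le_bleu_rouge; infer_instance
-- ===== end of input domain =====

-- B sorts the three dice into canonical order and compares once with [3,3,4],
-- instead of enumerating all 6 permutations of [3,4,3] and testing membership (objective: simpler).

-- ===== PORT A =====
-- itertools.permutations([a,b,c], 3) in itertools' order, ported by hand (exact:
-- permutations of a length-3 list yields these 6 index selections in this order).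
def pvPerms3 (xs : List Int) : List (Int × Int × Int) :=
  match xs with
  | [a, b, c] => [(a,b,c),(a,c,b),(b,a,c),(b,c,a),(c,a,b),(c,b,a)]
  | _ => []

def le_bleu_rouge (dico_dice : List (String × Int)) : Bool :=
  match (PySem.Dict.mk dico_dice).get? "chouette_1",
        (PySem.Dict.mk dico_dice).get? "chouette_2",
        (PySem.Dict.mk dico_dice).get? "cul" with
  | some chouette_1, some chouette_2, some cul =>
      let tuple_dice := (chouette_1, chouette_2, cul)
      let BLEU_ROUGE : List Int := [3, 4, 3]
      -- for i in permutations(BLEU_ROUGE,3): liste_comb.append(i)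
      let liste_comb := (pvPerms3 BLEU_ROUGE).foldl (fun acc i => acc ++ [i]) []
      if liste_comb.contains tuple_dice then true else false
  | _, _, _ => false  -- KeyError: excluded by Pre_

-- ===== PORT B =====
def le_bleu_rouge_alt (dico_dice : List (String × Int)) : Bool :=
  match (PySem.Dict.mk dico_dice).get? "chouette_1" with
  | none => false  -- KeyError: excluded by Pre_
  | some chouette_1 =>
    match (PySem.Dict.mk dico_dice).get? "chouette_2" with
    | none => false  -- KeyError: excluded by Pre_
    | some chouette_2 =>
      match (PySem.Dict.mk dico_dice).get? "cul" with
      | none => false  -- KeyError: excluded by Pre_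
      | some cul =>
          PySem.List.sorted [chouette_1, chouette_2, cul] (fun x => x) == [3, 3, 4]

-- ===== PRECONDITION & SPEC =====
-- A (and B) raise KeyError when any of the three die names is missing; Pre_ excludes exactly those inputs.
def Pre_le_bleu_rouge (dico_dice : List (String × Int)) : Prop :=
  "chouette_1" ∈ dico_dice.map Prod.fst ∧ "chouette_2" ∈ dico_dice.map Prod.fst ∧
    "cul" ∈ dico_dice.map Prod.fst
instance (dico_dice : List (String × Int)) : Decidable (Pre_le_bleu_rouge dico_dice) := by
  unfold Pre_le_bleu_rouge; infer_instance

def pvWitness_le_bleu_rouge : (List (String × Int)) :=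
  [("chouette_1", 3), ("chouette_2", 4), ("cul", 3)]

def Spec_le_bleu_rouge (dico_dice : List (String × Int)) (out : Bool) : Prop := out = le_bleu_rouge_alt dico_dice
instance (dico_dice : List (String × Int)) (out : Bool) : Decidable (Spec_le_bleu_rouge dico_dice out) := by unfold Spec_le_bleu_rouge; infer_instance

-- ===== CLAIM (what is proved, stated in full; the proofs are below) =====
def Claim_equal_le_bleu_rouge : Prop := ∀ (dico_dice : List (String × Int)), Dom_le_bleu_rouge dico_dice → Pre_le_bleu_rouge dico_dice → Spec_le_bleu_rouge dico_dice (le_bleu_rouge dico_dice)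

-- ===== LEMMAS AND PROOFS =====
-- Core fact: membership of (a,b,c) among the permutations of [3,4,3] equals
-- sorted([a,b,c]) = [3,3,4].
theorem pv_core (a b c : Int) :
    (decide ((a,b,c) ∈ pvPerms3 [3,4,3]))
      = (PySem.List.sorted [a,b,c] (fun x => x) == [3,3,4]) := by
  simp only [pvPerms3, PySem.List.sorted_eq_foldl_insertBy,
    PySem.List.insertBy, List.foldl]
  split_ifs <;> simp only [PySem.List.insertBy] <;> split_ifs <;>
    rw [Bool.eq_iff_iff] <;> simp_all [Prod.ext_iff] <;> omega

theorem le_bleu_rouge_equal (dico_dice : List (String × Int)) :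
    le_bleu_rouge dico_dice = le_bleu_rouge_alt dico_dice := by
  unfold le_bleu_rouge le_bleu_rouge_alt
  rcases h1 : (PySem.Dict.mk dico_dice).get? "chouette_1" with _ | c1 <;>
    rcases h2 : (PySem.Dict.mk dico_dice).get? "chouette_2" with _ | c2 <;>
      rcases h3 : (PySem.Dict.mk dico_dice).get? "cul" with _ | c3 <;> simp
  exact pv_core c1 c2 c3

-- ===== VERDICT (by name: the statement is the Claim_ definition above) =====
theorem le_bleu_rouge_spec : Claim_equal_le_bleu_rouge := by
  intro d _ _
  unfold Spec_le_bleu_rouge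
  exact le_bleu_rouge_equal d
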